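-- pv_equiv track=rewrite | github.com/Synthint/AdventOfCode | 2023/day_13/main.py | get_horizontal_mirror_exclude
-- ===== SOURCE A (Python) =====
-- def get_horizontal_mirror_exclude(block, exclude):
--     horzontal_ind = -1
--     for ind in range(1,len(block)):
--         if block[ind] == block[ind-1]:
--             ind_back = ind-2
--             ind_forward = ind+1
--             horzontal_ind = ind
--             while ind_back>=0 and ind_forward < len(block):
--                 if block[ind_forward] != block[ind_back]:
--                     horzontal_ind = -1
--                     break
--                 ind_back = ind_back - 1
--                 ind_forward = ind_forward+1
--         if horzontal_ind != -1 and horzontal_ind != exclude: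
--             return horzontal_ind
--     if horzontal_ind != exclude:
--         return horzontal_ind
--     return -1
-- ===== SOURCE B (Python) =====
-- def get_horizontal_mirror_exclude(block, exclude):
--     n = len(block)
--     for i in range(1, n):
--         if i == exclude or block[i] != block[i - 1]:
--             continue
--         top = block[:i][::-1]
--         bottom = block[i:]
--         m = min(len(top), len(bottom))
--         if top[:m] == bottom[:m]:
--             return i
--     return -1
-- ===== Notes on version B (the rewrite author's own statement) =====
-- stated objective: idiomatic
-- what changed: Replaces the two-pointer center-expansion with stateful carry-over by a stateless scan that tests each candidate line with a single whole-sequence slice comparison (reversed top prefix vs bottom prefix) and skips the excluded index (and lines whose adjacent rows already differ) directly.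
import Mathlib
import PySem

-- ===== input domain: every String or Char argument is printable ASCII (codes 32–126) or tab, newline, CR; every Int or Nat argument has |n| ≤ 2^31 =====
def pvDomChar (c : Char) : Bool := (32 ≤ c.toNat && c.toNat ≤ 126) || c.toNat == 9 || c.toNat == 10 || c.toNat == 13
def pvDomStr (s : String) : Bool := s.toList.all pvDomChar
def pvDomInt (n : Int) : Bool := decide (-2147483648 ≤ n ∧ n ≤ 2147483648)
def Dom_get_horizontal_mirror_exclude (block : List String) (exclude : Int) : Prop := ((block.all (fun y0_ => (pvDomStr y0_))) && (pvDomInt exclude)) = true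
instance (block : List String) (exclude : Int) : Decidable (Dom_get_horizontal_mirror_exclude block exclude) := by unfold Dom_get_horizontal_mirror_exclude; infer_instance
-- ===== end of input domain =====

-- B replaces A's two-pointer center expansion (with carried-over loop state) by a stateless
-- scan testing each line with one whole-sequence comparison of the mirrored halves (idiomatic).

-- ===== PORT A =====
-- the inner 'while ind_back>=0 and ind_forward<len(block)' loop: returns the updated horzontal_ind
def pvAInner (block : List String) (ind back fwd : Int) : Int :=
  if h : 0 ≤ back ∧ fwd < (block.length : Int) then
    if PySem.List.pyGet? block fwd ≠ PySem.List.pyGet? block back then -1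
    else pvAInner block ind (back - 1) (fwd + 1)
  else ind
termination_by (back + 1).toNat
decreasing_by omega

-- the outer 'for ind in range(1,len(block))' loop with early return, state = horzontal_ind
def pvALoop (block : List String) (exclude : Int) : List Int → Int → Int
  | [], h => if h ≠ exclude then h else -1
  | ind :: rest, h =>
    let h' := if PySem.List.pyGet? block ind = PySem.List.pyGet? block (ind - 1)
              then pvAInner block ind (ind - 2) (ind + 1) else h
    if h' ≠ -1 ∧ h' ≠ exclude then h' else pvALoop block exclude rest h'

def get_horizontal_mirror_exclude (block : List String) (exclude : Int) : Int :=
  pvALoop block exclude (PySem.List.pyRange 1 (block.length : Int) 1) (-1)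

-- ===== PORT B =====
-- Source B's mirror test: top = block[:i][::-1]; bottom = block[i:]; top[:m] == bottom[:m]
def pvIsMirror (block : List String) (i : Int) : Bool :=
  let top := (PySem.List.slice block none (some i)).reverse
  let bottom := PySem.List.slice block (some i) none
  let m := min top.length bottom.length
  top.take m == bottom.take m

def pvBLoop (block : List String) (exclude : Int) : List Int → Int
  | [] => -1
  | i :: rest =>
    if i = exclude ∨ PySem.List.pyGet? block i ≠ PySem.List.pyGet? block (i - 1) then
      pvBLoop block exclude rest
    else if pvIsMirror block i then i else pvBLoop block exclude rest

def get_horizontal_mirror_exclude_alt (block : List String) (exclude : Int) : Int :=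
  pvBLoop block exclude (PySem.List.pyRange 1 (block.length : Int) 1)

-- ===== PRECONDITION & SPEC =====
def Spec_get_horizontal_mirror_exclude (block : List String) (exclude : Int) (out : Int) : Prop := out = get_horizontal_mirror_exclude_alt block exclude
instance (block : List String) (exclude : Int) (out : Int) : Decidable (Spec_get_horizontal_mirror_exclude block exclude out) := by unfold Spec_get_horizontal_mirror_exclude; infer_instance

-- ===== CLAIM (what is proved, stated in full; the proofs are below) =====
def Claim_equal_get_horizontal_mirror_exclude : Prop := ∀ (block : List String) (exclude : Int), Dom_get_horizontal_mirror_exclude block exclude → Spec_get_horizontal_mirror_exclude block exclude (get_horizontal_mirror_exclude block exclude)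

-- ===== LEMMAS AND PROOFS =====

-- 'the pairs (j-1-t, j+t) match for all k ≤ t < m' — what both mirror tests decide
def pvMir (block : List String) (j m k : Nat) : Bool :=
  decide (∀ t : Nat, t < m → k ≤ t →
    PySem.List.pyGet? block ((j : Int) - 1 - (t : Int)) = PySem.List.pyGet? block ((j : Int) + (t : Int)))

lemma pvMir_succ (block : List String) (j m k : Nat) (hk : k < m)
    (hhead : PySem.List.pyGet? block ((j : Int) - 1 - (k : Int)) = PySem.List.pyGet? block ((j : Int) + (k : Int))) :
    pvMir block j m k = pvMir block j m (k + 1) := by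
  simp only [pvMir, decide_eq_decide]
  constructor
  · intro H t ht hkt; exact H t ht (by omega)
  · intro H t ht hkt
    rcases Nat.eq_or_lt_of_le hkt with h | h
    · subst h; exact hhead
    · exact H t ht (by omega)

lemma inner_char (block : List String) (j : Nat) :
    ∀ (fuel k : Nat), min j (block.length - j) - k ≤ fuel →
    pvAInner block (j : Int) ((j : Int) - 1 - (k : Int)) ((j : Int) + (k : Int)) =
      (if pvMir block j (min j (block.length - j)) k then (j : Int) else -1) := by
  intro fuel
  induction fuel with
  | zero =>
    intro k _
    have hkm : min j (block.length - j) ≤ k := by omega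
    rw [pvAInner]
    have hcond : ¬ (0 ≤ (j : Int) - 1 - (k : Int) ∧ (j : Int) + (k : Int) < (block.length : Int)) := by
      omega
    rw [dif_neg hcond]
    have : pvMir block j (min j (block.length - j)) k = true := by
      simp only [pvMir, decide_eq_true_eq]
      intro t ht hkt; omega
    rw [this, if_pos rfl]
  | succ fuel ih =>
    intro k hk
    by_cases hkm : k < min j (block.length - j)
    · rw [pvAInner]
      have hcond : 0 ≤ (j : Int) - 1 - (k : Int) ∧ (j : Int) + (k : Int) < (block.length : Int) := by
        omega
      rw [dif_pos hcond]
      by_cases heq : PySem.List.pyGet? block ((j : Int) + (k : Int)) = PySem.List.pyGet? block ((j : Int) - 1 - (k : Int))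
      · rw [if_neg (by simpa using heq)]
        have e1 : (j : Int) - 1 - (k : Int) - 1 = (j : Int) - 1 - ((k + 1 : Nat) : Int) := by push_cast; ring
        have e2 : (j : Int) + (k : Int) + 1 = (j : Int) + ((k + 1 : Nat) : Int) := by push_cast; ring
        rw [e1, e2, ih (k + 1) (by omega), pvMir_succ block j _ k hkm heq.symm]
      · rw [if_pos (by simpa using heq)]
        have : pvMir block j (min j (block.length - j)) k = false := by
          simp only [pvMir, decide_eq_false_iff_not]
          intro H
          exact heq (H k hkm le_rfl).symm
        rw [this, if_neg (by simp)]
    · -- loop never entered: same as the base case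
      rw [pvAInner]
      have hcond : ¬ (0 ≤ (j : Int) - 1 - (k : Int) ∧ (j : Int) + (k : Int) < (block.length : Int)) := by
        omega
      rw [dif_neg hcond]
      have : pvMir block j (min j (block.length - j)) k = true := by
        simp only [pvMir, decide_eq_true_eq]
        intro t ht hkt; omega
      rw [this, if_pos rfl]

lemma isMirror_eq (block : List String) (j : Nat) (_h1 : 1 ≤ j) (h2 : j < block.length) :
    pvIsMirror block (j : Int) = pvMir block j (min j (block.length - j)) 0 := by
  have hjle : j ≤ block.length := le_of_lt h2
  simp only [pvIsMirror, PySem.List.slice_to_natCast, PySem.List.slice_from_natCast]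
  have hlt : (block.take j).reverse.length = j := by simp [Nat.min_eq_left hjle]
  have hlb : (block.drop j).length = block.length - j := by simp
  rw [hlt, hlb]
  set m := min j (block.length - j) with hm
  have hmj : m ≤ j := Nat.min_le_left _ _
  have hmb : m ≤ block.length - j := Nat.min_le_right _ _
  simp only [pvMir]
  rw [Bool.eq_iff_iff, beq_iff_eq, decide_eq_true_eq]
  constructor
  · intro heq t ht _
    have e1 : (j : Int) - 1 - (t : Int) = ((j - 1 - t : Nat) : Int) := by omega
    have e2 : (j : Int) + (t : Int) = ((j + t : Nat) : Int) := by push_cast; ring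
    rw [e1, e2, PySem.List.pyGet?_natCast, PySem.List.pyGet?_natCast]
    have h3 : j - 1 - t < block.length := by omega
    have h4 : j + t < block.length := by omega
    have := congrArg (fun xs => xs[t]?) heq
    simp only [List.getElem?_take] at this
    rw [if_pos ht, if_pos ht] at this
    have hrev : ((block.take j).reverse)[t]? = some block[j - 1 - t] := by
      have htj : t < (block.take j).reverse.length := by rw [hlt]; omega
      rw [List.getElem?_eq_getElem htj]
      congr 1
      rw [List.getElem_reverse, List.getElem_take]
      congr 1
      simp [Nat.min_eq_left hjle]
    have hdrp : (block.drop j)[t]? = some block[j + t] := by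
      have htb : t < (block.drop j).length := by rw [hlb]; omega
      rw [List.getElem?_eq_getElem htb]
      congr 1
      rw [List.getElem_drop]
    rw [hrev, hdrp] at this
    rw [List.getElem?_eq_getElem h3, List.getElem?_eq_getElem h4]
    exact this
  · intro H
    apply List.ext_getElem
    · simp [hlt, hlb]; omega
    · intro t ht1 ht2
      have htm : t < m := by simp [hlt] at ht1; omega
      have h3 : j - 1 - t < block.length := by omega
      have h4 : j + t < block.length := by omega
      have := H t htm (Nat.zero_le t)
      have e1 : (j : Int) - 1 - (t : Int) = ((j - 1 - t : Nat) : Int) := by omega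
      have e2 : (j : Int) + (t : Int) = ((j + t : Nat) : Int) := by push_cast; ring
      rw [e1, e2, PySem.List.pyGet?_natCast, PySem.List.pyGet?_natCast,
        List.getElem?_eq_getElem h3, List.getElem?_eq_getElem h4] at this
      have hv := Option.some.inj this
      rw [List.getElem_take, List.getElem_take, List.getElem_reverse, List.getElem_take,
        List.getElem_drop]
      simp only [List.length_take, Nat.min_eq_left hjle]
      exact hv

lemma loop_eq (block : List String) (exclude : Int) :
    ∀ (inds : List Int) (h : Int),
      (∀ i ∈ inds, 1 ≤ i ∧ i < (block.length : Int)) →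
      (h = -1 ∨ h = exclude) →
      pvALoop block exclude inds h = pvBLoop block exclude inds := by
  intro inds
  induction inds with
  | nil =>
    intro h _ hh
    rcases hh with hh | hh <;> subst hh <;> simp [pvALoop, pvBLoop]
  | cons i rest ih =>
    intro h hmem hh
    have hi := hmem i (List.mem_cons_self)
    have hrest : ∀ x ∈ rest, 1 ≤ x ∧ x < (block.length : Int) :=
      fun x hx => hmem x (List.mem_cons_of_mem _ hx)
    obtain ⟨j, rfl⟩ : ∃ j : Nat, i = (j : Int) := ⟨i.toNat, by omega⟩
    have hj1 : 1 ≤ j := by omega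
    have hj2 : j < block.length := by omega
    have hm1 : 1 ≤ min j (block.length - j) := by omega
    rw [pvALoop, pvBLoop]
    by_cases heq : PySem.List.pyGet? block (j : Int) = PySem.List.pyGet? block ((j : Int) - 1)
    · rw [if_pos heq]
      have e1 : (j : Int) - 2 = (j : Int) - 1 - ((1 : Nat) : Int) := by push_cast; ring
      have e2 : (j : Int) + 1 = (j : Int) + ((1 : Nat) : Int) := by push_cast; ring
      rw [e1, e2, inner_char block j _ 1 le_rfl]
      have hhead : PySem.List.pyGet? block ((j : Int) - 1 - ((0 : Nat) : Int)) =
          PySem.List.pyGet? block ((j : Int) + ((0 : Nat) : Int)) := by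
        simpa using heq.symm
      have hstep := pvMir_succ block j (min j (block.length - j)) 0 hm1 hhead
      by_cases hmir : pvMir block j (min j (block.length - j)) 1 = true
      · rw [if_pos hmir]
        have hmir0 : pvIsMirror block (j : Int) = true := by
          rw [isMirror_eq block j hj1 hj2, hstep, hmir]
        by_cases hex : (j : Int) = exclude
        · rw [if_neg (fun hc => hc.2 hex), if_pos (Or.inl hex)]
          exact ih _ hrest (Or.inr hex)
        · rw [if_pos ⟨by omega, hex⟩,
            if_neg (by rintro (h | h); exact hex h; exact h heq), if_pos hmir0]
      · rw [if_neg hmir]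
        have hmir0 : pvIsMirror block (j : Int) = false := by
          rw [isMirror_eq block j hj1 hj2, hstep]
          simpa using hmir
        rw [if_neg (by simp)]
        by_cases hex : (j : Int) = exclude
        · rw [if_pos (Or.inl hex)]; exact ih _ hrest (Or.inl rfl)
        · rw [if_neg (by rintro (h | h); exact hex h; exact h heq), hmir0,
            if_neg (by simp)]
          exact ih _ hrest (Or.inl rfl)
    · rw [if_neg heq]
      have hcond : ¬ (h ≠ -1 ∧ h ≠ exclude) := by
        rcases hh with hh | hh <;> subst hh <;> simp
      rw [if_neg hcond, if_pos (Or.inr heq)]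
      exact ih _ hrest hh

-- ===== VERDICT (by name: the statement is the Claim_ definition above) =====
theorem get_horizontal_mirror_exclude_spec : Claim_equal_get_horizontal_mirror_exclude := by
  intro block exclude _
  unfold Spec_get_horizontal_mirror_exclude get_horizontal_mirror_exclude get_horizontal_mirror_exclude_alt
  exact loop_eq block exclude _ (-1)
    (fun i hi => by
      rw [PySem.List.mem_pyRange_one] at hi
      exact hi)
    (Or.inl rfl)
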